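-- pv_equiv track=rewrite | github.com/lucalavezzo/WRemnantsHelpers | studies/pdf_from_corrs_bias_test/run_fitter.py | normalize_pdf_list
-- ===== SOURCE A (Python) =====
-- PDF_TO_THEORY_CORR = {
--     "ct18z": "scetlib_dyturbo_LatticeNP_CT18Z_N3p0LL_N2LO",
--     "herapdf20": "scetlib_dyturbo_LatticeNP_HERAPDF20_N3p0LL_N2LO",
--     "msht20": "scetlib_dyturbo_LatticeNP_MSHT20_N3p0LL_N2LO",
--     "msht20an3lo": "scetlib_dyturbo_LatticeNP_MSHT20aN3LO_N3p0LL_N2LO",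
--     "nnpdf40": "scetlib_dyturbo_LatticeNP_NNPDF40_N3p0LL_N2LO",
--     "pdf4lhc21": "scetlib_dyturbo_LatticeNP_PDF4LHC21_N3p0LL_N2LO",
--     "nnpdf31": "scetlib_dyturbo_LatticeNP_NNPDF31_N3p0LL_N2LO",
--     "ct18": "scetlib_dyturbo_LatticeNP_CT18_N3p0LL_N2LO",
-- }
--
-- def normalize_pdf(pdf):
--     return pdf.lower()
--
-- def normalize_pdf_list(pdfs):
--     out = []
--     seen = set()
--     for pdf in pdfs:
--         norm = normalize_pdf(pdf)
--         if norm not in PDF_TO_THEORY_CORR or norm in seen: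
--             continue
--         out.append(norm)
--         seen.add(norm)
--     return out
-- ===== SOURCE B (Python) =====
-- PDF_TO_THEORY_CORR = {
--     "ct18z": "scetlib_dyturbo_LatticeNP_CT18Z_N3p0LL_N2LO",
--     "herapdf20": "scetlib_dyturbo_LatticeNP_HERAPDF20_N3p0LL_N2LO",
--     "msht20": "scetlib_dyturbo_LatticeNP_MSHT20_N3p0LL_N2LO",
--     "msht20an3lo": "scetlib_dyturbo_LatticeNP_MSHT20aN3LO_N3p0LL_N2LO",
--     "nnpdf40": "scetlib_dyturbo_LatticeNP_NNPDF40_N3p0LL_N2LO",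
--     "pdf4lhc21": "scetlib_dyturbo_LatticeNP_PDF4LHC21_N3p0LL_N2LO",
--     "nnpdf31": "scetlib_dyturbo_LatticeNP_NNPDF31_N3p0LL_N2LO",
--     "ct18": "scetlib_dyturbo_LatticeNP_CT18_N3p0LL_N2LO",
-- }
--
-- def normalize_pdf_list(pdfs):
--     # Drive the scan by the (small, fixed) known-key set instead of the input:
--     # keep the known keys that occur in the lowercased input, ordered by the
--     # position of their first occurrence.  Deduplication is implicit: each key
--     # appears once, and first-occurrence order is recovered by the sort.
--     lowered = [p.lower() for p in pdfs]
--     hits = [k for k in PDF_TO_THEORY_CORR if k in lowered]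
--     hits.sort(key=lowered.index)
--     return hits
-- ===== Notes on version B (the rewrite author's own statement) =====
-- stated objective: alternative
-- what changed: Instead of A's single input pass with a seen-set and output accumulator, B scans the fixed 8-key known set against the lowercased input, keeps the keys that occur, and sorts them by the index of their first occurrence; dedup is implicit and order is recovered by the sort rather than maintained during a pass.
import Mathlib
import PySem

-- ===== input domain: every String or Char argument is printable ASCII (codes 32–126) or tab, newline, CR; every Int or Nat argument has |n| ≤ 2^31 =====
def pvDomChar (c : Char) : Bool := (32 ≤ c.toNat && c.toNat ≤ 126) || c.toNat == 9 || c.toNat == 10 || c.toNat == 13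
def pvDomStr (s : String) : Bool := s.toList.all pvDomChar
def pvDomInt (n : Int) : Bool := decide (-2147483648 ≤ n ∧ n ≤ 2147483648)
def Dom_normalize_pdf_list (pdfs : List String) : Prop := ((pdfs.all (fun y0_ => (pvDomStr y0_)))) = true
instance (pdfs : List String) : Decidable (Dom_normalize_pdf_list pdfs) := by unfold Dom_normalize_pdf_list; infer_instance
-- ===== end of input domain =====

-- B drops A's seen-set/accumulator pass over the input; it scans the fixed known-key set
-- against the lowercased input and sorts the present keys by first-occurrence index (alternative).

-- ===== PORT A =====
def PDF_TO_THEORY_CORR : PySem.Dict String String := PySem.Dict.ofList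
  [ ("ct18z", "scetlib_dyturbo_LatticeNP_CT18Z_N3p0LL_N2LO"),
    ("herapdf20", "scetlib_dyturbo_LatticeNP_HERAPDF20_N3p0LL_N2LO"),
    ("msht20", "scetlib_dyturbo_LatticeNP_MSHT20_N3p0LL_N2LO"),
    ("msht20an3lo", "scetlib_dyturbo_LatticeNP_MSHT20aN3LO_N3p0LL_N2LO"),
    ("nnpdf40", "scetlib_dyturbo_LatticeNP_NNPDF40_N3p0LL_N2LO"),
    ("pdf4lhc21", "scetlib_dyturbo_LatticeNP_PDF4LHC21_N3p0LL_N2LO"),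
    ("nnpdf31", "scetlib_dyturbo_LatticeNP_NNPDF31_N3p0LL_N2LO"),
    ("ct18", "scetlib_dyturbo_LatticeNP_CT18_N3p0LL_N2LO") ]

def normalize_pdf (pdf : String) : String := PySem.Str.lower pdf

def normalize_pdf_list (pdfs : List String) : List String :=
  (pdfs.foldl
    (fun (acc : List String × PySem.Set String) pdf =>
      let norm := normalize_pdf pdf
      if ¬ PDF_TO_THEORY_CORR.contains norm ∨ PySem.Set.contains acc.2 norm then acc
      else (acc.1 ++ [norm], PySem.Set.add acc.2 norm))
    ([], PySem.Set.empty)).1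

-- ===== PORT B =====
-- 'lowered.index(k)' never raises in Source B: the filter guarantees k ∈ lowered, so
-- index? is some there and the '.getD 0' default is never taken.
def normalize_pdf_list_alt (pdfs : List String) : List String :=
  let lowered := pdfs.map PySem.Str.lower
  let hits := PDF_TO_THEORY_CORR.keys.filter (fun k => lowered.contains k)
  PySem.List.sorted hits (fun k => (PySem.List.index? lowered k).getD 0)

-- ===== PRECONDITION & SPEC =====
def Spec_normalize_pdf_list (pdfs : List String) (out : List String) : Prop := out = normalize_pdf_list_alt pdfs
instance (pdfs : List String) (out : List String) : Decidable (Spec_normalize_pdf_list pdfs out) := by unfold Spec_normalize_pdf_list; infer_instance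

-- ===== CLAIM (what is proved, stated in full; the proofs are below) =====
def Claim_equal_normalize_pdf_list : Prop := ∀ (pdfs : List String), Dom_normalize_pdf_list pdfs → Spec_normalize_pdf_list pdfs (normalize_pdf_list pdfs)

-- ===== LEMMAS AND PROOFS =====

-- Loop invariant: starting from a state (s, s), A's fold keeps out = seen, and the final
-- seen is s updated with all in-dict lowered names.
lemma normalize_loop (pdfs : List String) (s : PySem.Set String) :
    pdfs.foldl
      (fun (acc : List String × PySem.Set String) pdf =>
        let norm := normalize_pdf pdf
        if ¬ PDF_TO_THEORY_CORR.contains norm ∨ PySem.Set.contains acc.2 norm then acc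
        else (acc.1 ++ [norm], PySem.Set.add acc.2 norm))
      (s, s)
    = (let t := PySem.Set.update s
          (pdfs.filterMap (fun p =>
            if PDF_TO_THEORY_CORR.contains (PySem.Str.lower p) then some (PySem.Str.lower p) else none));
       (t, t)) := by
  induction pdfs generalizing s with
  | nil => simp [PySem.Set.update]
  | cons p rest ih =>
    simp only [List.foldl_cons, List.filterMap_cons]
    by_cases hc : PDF_TO_THEORY_CORR.contains (PySem.Str.lower p)
    · by_cases hs : PySem.Str.lower p ∈ s
      · rw [show (if ¬ PDF_TO_THEORY_CORR.contains (normalize_pdf p) ∨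
              PySem.Set.contains s (normalize_pdf p) then (s, s)
              else (s ++ [normalize_pdf p], PySem.Set.add s (normalize_pdf p))) = (s, s) by
            simp [normalize_pdf, hc, hs]]
        rw [ih]
        simp [hc, PySem.Set.update, PySem.Set.add, hs]
      · rw [show (if ¬ PDF_TO_THEORY_CORR.contains (normalize_pdf p) ∨
              PySem.Set.contains s (normalize_pdf p) then (s, s)
              else (s ++ [normalize_pdf p], PySem.Set.add s (normalize_pdf p))) =
              (PySem.Set.add s (normalize_pdf p), PySem.Set.add s (normalize_pdf p)) by
            simp [normalize_pdf, hc, hs, PySem.Set.add]]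
        rw [ih]
        simp [normalize_pdf, hc, PySem.Set.update]
    · rw [show (if ¬ PDF_TO_THEORY_CORR.contains (normalize_pdf p) ∨
            PySem.Set.contains s (normalize_pdf p) then (s, s)
            else (s ++ [normalize_pdf p], PySem.Set.add s (normalize_pdf p))) = (s, s) by
          simp [normalize_pdf, hc]]
      rw [ih]
      simp [hc]

-- A's selected filterMap is the filter of the lowered list.
lemma filterMap_eq_filter_lower (pdfs : List String) :
    pdfs.filterMap (fun p =>
        if PDF_TO_THEORY_CORR.contains (PySem.Str.lower p) then some (PySem.Str.lower p) else none)
      = (pdfs.map PySem.Str.lower).filter (fun s => PDF_TO_THEORY_CORR.contains s) := by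
  induction pdfs with
  | nil => rfl
  | cons p rest ih =>
    by_cases hc : PDF_TO_THEORY_CORR.contains (PySem.Str.lower p) <;>
      simp [hc, ih]

-- A's output is the ordered dedup of the in-dict lowered names.
lemma A_eq_ofList_filter (pdfs : List String) :
    normalize_pdf_list pdfs
      = PySem.Set.ofList ((pdfs.map PySem.Str.lower).filter (fun s => PDF_TO_THEORY_CORR.contains s)) := by
  unfold normalize_pdf_list
  rw [show (([], PySem.Set.empty) : List String × PySem.Set String)
        = (([], []) : List String × PySem.Set String) from rfl,
      normalize_loop pdfs ([] : PySem.Set String)]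
  simp [filterMap_eq_filter_lower, PySem.Set.update_nil_left]

-- index into x :: l of a member y ≠ x is one more than its index into l.
lemma idx_cons {l : List String} {x y : String} (hy : y ∈ l) (hne : x ≠ y) :
    (PySem.List.index? (x :: l) y).getD 0 = (PySem.List.index? l y).getD 0 + 1 := by
  obtain ⟨j, hj⟩ := Option.isSome_iff_exists.mp ((PySem.List.index?_isSome_iff l y).mpr hy)
  rw [PySem.List.index?_cons_of_ne l hne, hj]
  rfl

-- The ordered dedup of a filtered list is strictly increasing in first-occurrence index.
lemma pairwise_idx (l : List String) (p : String → Bool) :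
    (PySem.Set.ofList (l.filter p)).Pairwise
      (fun a b => (PySem.List.index? l a).getD 0 < (PySem.List.index? l b).getD 0) := by
  induction l with
  | nil => simp
  | cons x l ih =>
    have hmem : ∀ y ∈ PySem.Set.ofList (l.filter p), y ∈ l ∧ p y := by
      intro y hy
      have := (PySem.Set.mem_ofList (l.filter p) y).mp hy
      exact ⟨(List.mem_filter.mp this).1, (List.mem_filter.mp this).2⟩
    by_cases hp : p x
    · rw [show (x :: l).filter p = x :: l.filter p by simp [hp],
          PySem.Set.ofList_cons]
      refine List.pairwise_cons.mpr ⟨?_, ?_⟩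
      · intro y hy
        obtain ⟨hy', hne⟩ := (PySem.Set.mem_discard _ x y).mp hy
        obtain ⟨hyl, _⟩ := hmem y hy'
        rw [show PySem.List.index? (x :: l) x = some 0 from PySem.List.index?_cons_self x l,
            idx_cons hyl (Ne.symm hne)]
        simp
      · -- discard is a filter of the deduped tail: Pairwise survives, indices shift by one
        have hsub : List.Sublist ((PySem.Set.ofList (l.filter p)).discard x) (PySem.Set.ofList (l.filter p)) := by
          simp [PySem.Set.discard]
        refine List.Pairwise.imp_of_mem ?_ (ih.sublist hsub)
        intro a b ha hb hlt
        obtain ⟨ha', hax⟩ := (PySem.Set.mem_discard _ x a).mp ha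
        obtain ⟨hb', hbx⟩ := (PySem.Set.mem_discard _ x b).mp hb
        rw [idx_cons (hmem a ha').1 (Ne.symm hax), idx_cons (hmem b hb').1 (Ne.symm hbx)]
        omega
    · rw [show (x :: l).filter p = l.filter p by simp [hp]]
      refine List.Pairwise.imp_of_mem ?_ ih
      intro a b ha hb hlt
      have hax : x ≠ a := fun h => hp (h ▸ (hmem a ha).2)
      have hbx : x ≠ b := fun h => hp (h ▸ (hmem b hb).2)
      rw [idx_cons (hmem a ha).1 hax, idx_cons (hmem b hb).1 hbx]
      omega

-- A's dedup list and B's hit list hold the same strings, each without duplicates.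
lemma perm_hits (pdfs : List String) :
    (PySem.Set.ofList ((pdfs.map PySem.Str.lower).filter (fun s => PDF_TO_THEORY_CORR.contains s))).Perm
      (PDF_TO_THEORY_CORR.keys.filter (fun k => (pdfs.map PySem.Str.lower).contains k)) := by
  have hkeys : PDF_TO_THEORY_CORR.keys.Nodup := by decide
  rw [List.perm_ext_iff_of_nodup (PySem.Set.nodup_ofList _) (hkeys.filter _)]
  intro a
  rw [PySem.Set.mem_ofList, List.mem_filter, List.mem_filter]
  constructor
  · rintro ⟨hmem, hc⟩
    exact ⟨(PySem.Dict.contains_iff_mem_keys _ _).mp hc, by simpa using hmem⟩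
  · rintro ⟨hk, hmem⟩
    exact ⟨by simpa using hmem, (PySem.Dict.contains_iff_mem_keys _ _).mpr hk⟩

-- ===== VERDICT (by name: the statement is the Claim_ definition above) =====
theorem normalize_pdf_list_spec : Claim_equal_normalize_pdf_list := by
  intro pdfs _
  unfold Spec_normalize_pdf_list normalize_pdf_list_alt
  rw [A_eq_ofList_filter]
  exact (PySem.List.sorted_eq_of_perm_of_pairwise_lt _ _ _
    (perm_hits pdfs) (pairwise_idx (pdfs.map PySem.Str.lower) _)).symm
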